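-- pv_equiv track=rewrite | github.com/data61/clkhash | clkhash/clk.py | chunks_gen
-- ===== SOURCE A (Python) =====
-- from itertools import islice, chain
-- from typing import (AnyStr, Callable, cast, Iterable, List, Optional,
--                     Sequence, Tuple, TypeVar, Union, Iterator)
--
-- T = TypeVar('T')  # Declare generic type variable
--
-- def chunks_gen(iterable: Iterable[T], chunk_size: int) -> Iterator[Tuple[int, Sequence[T]]]:
--     """ Batch data into chunks of length chunk_size. The last chunk may be shorter.
--
--         :param iterable: An iterable to chunk
--         :param chunk_size: The size of a chunk.
--     """
--     if chunk_size < 1: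
--         raise ValueError('chunk_size must be at least one')
--     it = iter(iterable)
--     idx = 0
--     while chunk := tuple(islice(it, chunk_size)):
--         yield idx, chunk
--         idx += 1
-- ===== SOURCE B (Python) =====
-- def chunks_gen(iterable, chunk_size):
--     """Batch data into indexed chunks via direct index arithmetic over a
--     materialised list, instead of repeatedly pulling from an iterator."""
--     if chunk_size < 1:
--         raise ValueError('chunk_size must be at least one')
--     items = list(iterable)
--     n_chunks = (len(items) + chunk_size - 1) // chunk_size
--     for idx in range(n_chunks):
--         yield idx, tuple(items[idx * chunk_size:(idx + 1) * chunk_size])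
-- ===== Notes on version B (the rewrite author's own statement) =====
-- stated objective: alternative
-- what changed: B materialises the input, computes the chunk count by ceiling division, and builds each chunk by index-arithmetic slicing, instead of A's while-loop repeatedly pulling islice chunks from a shared iterator.
import Mathlib
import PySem

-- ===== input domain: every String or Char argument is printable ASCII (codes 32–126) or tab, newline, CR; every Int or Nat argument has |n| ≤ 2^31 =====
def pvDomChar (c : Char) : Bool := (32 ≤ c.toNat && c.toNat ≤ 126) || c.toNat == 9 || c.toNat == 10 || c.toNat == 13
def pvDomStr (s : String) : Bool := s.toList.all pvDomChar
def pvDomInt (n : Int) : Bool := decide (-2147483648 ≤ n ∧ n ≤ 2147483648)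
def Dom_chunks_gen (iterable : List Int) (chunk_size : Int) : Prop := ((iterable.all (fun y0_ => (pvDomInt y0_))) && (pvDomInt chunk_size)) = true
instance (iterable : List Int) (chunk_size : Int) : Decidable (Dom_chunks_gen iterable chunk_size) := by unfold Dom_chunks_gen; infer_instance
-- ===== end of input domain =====

-- B replaces A's iterator-pulling while-loop by ceiling-division chunk counting with index-arithmetic slicing (alternative decomposition, same O(n) cost).


-- ===== PORT A =====
-- A's while-loop: pull the next chunk_size elements, yield them with the index, repeat.
-- k encodes the chunk size as k+1 (chunk_size ≥ 1 on Pre_), making termination structural.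
def chunksALoop (l : List Int) (k : Nat) (idx : Int) : List (Int × List Int) :=
  match l with
  | [] => []
  | x :: xs => (idx, (x :: xs).take (k + 1)) :: chunksALoop ((x :: xs).drop (k + 1)) k (idx + 1)
  termination_by l.length
  decreasing_by simp only [List.length_drop, List.length_cons]; omega

def chunks_gen (iterable : List Int) (chunk_size : Int) : List (Int × List Int) :=
  if chunk_size < 1 then []   -- Python raises ValueError here; outside Pre_
  else chunksALoop iterable (chunk_size.toNat - 1) 0

-- ===== PORT B =====
def chunks_gen_alt (iterable : List Int) (chunk_size : Int) : List (Int × List Int) :=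
  if chunk_size < 1 then []   -- Python raises ValueError here; outside Pre_
  else
    (PySem.List.pyRange 0 (PySem.Int.floordiv ((iterable.length : Int) + chunk_size - 1) chunk_size) 1).map
      (fun idx => (idx, PySem.List.slice iterable (some (idx * chunk_size)) (some ((idx + 1) * chunk_size))))

-- ===== PRECONDITION & SPEC =====
-- Pre_ excludes chunk_size < 1, on which Python A raises ValueError.
def Pre_chunks_gen (iterable : List Int) (chunk_size : Int) : Prop := 1 ≤ chunk_size
instance (iterable : List Int) (chunk_size : Int) : Decidable (Pre_chunks_gen iterable chunk_size) := by unfold Pre_chunks_gen; infer_instance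
def pvWitness_chunks_gen : List Int × Int := ([1, 2, 3], 2)

def Spec_chunks_gen (iterable : List Int) (chunk_size : Int) (out : List (Int × List Int)) : Prop := out = chunks_gen_alt iterable chunk_size
instance (iterable : List Int) (chunk_size : Int) (out : List (Int × List Int)) : Decidable (Spec_chunks_gen iterable chunk_size out) := by unfold Spec_chunks_gen; infer_instance

-- ===== CLAIM (what is proved, stated in full; the proofs are below) =====
def Claim_equal_chunks_gen : Prop := ∀ (iterable : List Int) (chunk_size : Int), Dom_chunks_gen iterable chunk_size → Pre_chunks_gen iterable chunk_size → Spec_chunks_gen iterable chunk_size (chunks_gen iterable chunk_size)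

-- ===== LEMMAS AND PROOFS =====

-- Number of chunks: ceiling division on the Nat side.
lemma chunksALoop_eq_map_range (k : Nat) : ∀ (n : Nat) (l : List Int), l.length ≤ n → ∀ (m : Int),
    chunksALoop l k m =
      (List.range ((l.length + k) / (k + 1))).map
        (fun (j : Nat) => ((m + (j : Int)), (l.drop (j * (k + 1))).take (k + 1))) := by
  intro n
  induction n with
  | zero =>
    intro l hl m
    have : l = [] := List.eq_nil_of_length_eq_zero (by omega)
    subst this
    have h0 : k / (k + 1) = 0 := Nat.div_eq_of_lt (Nat.lt_succ_self k)
    simp [chunksALoop, h0]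
  | succ n ih =>
    intro l hl m
    match l with
    | [] =>
      have h0 : k / (k + 1) = 0 := Nat.div_eq_of_lt (Nat.lt_succ_self k)
      simp [chunksALoop, h0]
    | a :: t =>
      rw [chunksALoop]
      have hlen : ((a :: t).length + k) / (k + 1)
          = (((a :: t).drop (k + 1)).length + k) / (k + 1) + 1 := by
        simp only [List.length_drop, List.length_cons]
        rcases Nat.lt_or_ge (t.length + 1) (k + 1) with h | h
        · have h1 : (t.length + 1 + k) / (k + 1) = 1 :=
            Nat.div_eq_of_lt_le (by omega) (by omega)
          have h2 : (t.length + 1 - (k + 1) + k) / (k + 1) = 0 :=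
            Nat.div_eq_of_lt (by omega)
          omega
        · have he : t.length + 1 + k = (t.length + 1 - (k + 1) + k) + (k + 1) := by omega
          rw [he, Nat.add_div_right _ (by omega)]
      rw [hlen, List.range_succ_eq_map, List.map_cons, List.map_map,
          ih ((a :: t).drop (k + 1))
            (by simp only [List.length_cons] at hl
                simp only [List.length_drop, List.length_cons]; omega) (m + 1)]
      refine congrArg₂ List.cons (by simp) ?_
      apply List.map_congr_left
      intro j _
      simp only [Function.comp_apply]
      refine congrArg₂ Prod.mk (by push_cast; ring) ?_
      rw [List.drop_drop]
      congr 1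
      simp only [Nat.succ_eq_add_one]
      ring_nf

theorem chunks_gen_spec_aux (l : List Int) (c : Int) (hc : 1 ≤ c) :
    chunks_gen l c = chunks_gen_alt l c := by
  obtain ⟨k, hk⟩ : ∃ k : Nat, c = (k : Int) + 1 := ⟨c.toNat - 1, by omega⟩
  subst hk
  have hnotlt : ¬ ((k : Int) + 1 < 1) := by omega
  rw [chunks_gen, chunks_gen_alt, if_neg hnotlt, if_neg hnotlt]
  have htoNat : ((k : Int) + 1).toNat - 1 = k := by omega
  rw [htoNat]
  have hn : PySem.Int.floordiv ((l.length : Int) + ((k : Int) + 1) - 1) ((k : Int) + 1)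
      = (((l.length + k) / (k + 1) : Nat) : Int) := by
    have h1 : (l.length : Int) + ((k : Int) + 1) - 1 = ((l.length + k : Nat) : Int) := by
      push_cast; ring
    have h2 : ((k : Int) + 1) = (((k + 1 : Nat)) : Int) := by push_cast; ring
    rw [h1, h2, PySem.Int.floordiv_natCast]
  rw [hn, PySem.List.pyRange_zero_nat, List.map_map,
      chunksALoop_eq_map_range k l.length l (le_refl _)]
  apply List.map_congr_left
  intro j _
  simp only [Function.comp_apply]
  have ha : (0 : Int) ≤ (j : Int) * ((k : Int) + 1) := by positivity
  have hb : (0 : Int) ≤ ((j : Int) + 1) * ((k : Int) + 1) := by positivity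
  have e1 : (j : Int) * ((k : Int) + 1) = ((j * (k + 1) : Nat) : Int) := by push_cast; ring
  have e2 : ((j : Int) + 1) * ((k : Int) + 1) = (((j + 1) * (k + 1) : Nat) : Int) := by push_cast; ring
  have h3 : (j + 1) * (k + 1) - j * (k + 1) = k + 1 := by
    rw [Nat.succ_mul, Nat.add_sub_cancel_left]
  rw [PySem.List.slice_toNat _ ha hb, e1, e2, Int.toNat_natCast, Int.toNat_natCast, h3]
  simp

-- ===== VERDICT (by name: the statement is the Claim_ definition above) =====
theorem chunks_gen_spec : Claim_equal_chunks_gen := by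
  intro l c _ hpre
  exact chunks_gen_spec_aux l c hpre
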